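-- pv_equiv track=rewrite | github.com/iofu728/ProgrammingCode | work/20HL/2.py | nextValue
-- ===== SOURCE A (Python) =====
-- def nextValue(chars, currentValue):
--     N, M = len(chars), len(currentValue)
--     char2id = {jj: ii for ii, jj in enumerate(chars)}
--     pre = 1
--     res = []
--     for ii in range(M - 1, -1, -1):
--         now = char2id[currentValue[ii]] + pre
--         pre = now // N
--         now = now % N
--         res.append(chars[now])
--     if pre:
--         res.append(chars[pre])
--     return ''.join(res[::-1])
-- ===== SOURCE B (Python) =====
-- def nextValue(chars, currentValue):
--     N = len(chars)
--     char2id = {c: i for i, c in enumerate(chars)}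
--     val = 0
--     for c in currentValue:
--         val = val * N + char2id[c]
--     val += 1
--     digits = []
--     while val:
--         digits.append(chars[val % N])
--         val //= N
--     out = ''.join(reversed(digits))
--     return chars[0] * (len(currentValue) - len(out)) + out
-- ===== Notes on version B (the rewrite author's own statement) =====
-- stated objective: alternative
-- what changed: Replaces A's explicit per-digit carry-propagation loop (right-to-left with pre/now bookkeeping and a final carry append) by decoding currentValue to one integer with Horner's rule, adding 1, and re-encoding it in base N with left zero-padding.
import Mathlib
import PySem

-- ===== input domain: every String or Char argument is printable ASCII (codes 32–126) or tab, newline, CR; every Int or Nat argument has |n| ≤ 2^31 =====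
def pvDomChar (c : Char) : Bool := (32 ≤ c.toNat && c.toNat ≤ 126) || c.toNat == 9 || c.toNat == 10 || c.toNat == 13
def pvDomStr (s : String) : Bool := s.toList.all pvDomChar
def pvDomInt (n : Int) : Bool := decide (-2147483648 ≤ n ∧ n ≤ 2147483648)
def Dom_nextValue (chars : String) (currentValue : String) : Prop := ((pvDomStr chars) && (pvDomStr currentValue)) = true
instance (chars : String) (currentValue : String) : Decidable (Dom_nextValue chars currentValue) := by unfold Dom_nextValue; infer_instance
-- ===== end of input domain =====

-- B replaces A's explicit per-digit carry propagation by decode-to-integer (Horner), add 1,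
-- re-encode in base N with left padding (objective: alternative algorithm, same cost class).

-- ===== PORT A =====
-- literal port of A: dict from enumerate, the right-to-left index loop as a fold over the
-- reversed character list with the same (pre, res) state, final carry digit, join of res[::-1]
def nextValue (chars : String) (currentValue : String) : String :=
  let cs := chars.toList
  let cv := currentValue.toList
  let N : Int := (cs.length : Int)
  let char2id : PySem.Dict Char Int :=
    (PySem.List.enumerate cs 0).foldl (fun d p => d.insert p.2 p.1) PySem.Dict.empty
  let st := cv.reverse.foldl (fun (st : Int × List Char) c =>
      let now := char2id.getD c 0 + st.1
      let pre := PySem.Int.floordiv now N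
      let now := PySem.Int.mod now N
      (pre, st.2 ++ [PySem.List.pyGetD cs now ' '])) (1, ([] : List Char))
  let res := if st.1 ≠ 0 then st.2 ++ [PySem.List.pyGetD cs st.1 ' '] else st.2
  String.ofList res.reverse

-- ===== PORT B =====
-- B's while-loop: append chars[val % N], val //= N, until val == 0.
-- (the 'v ≤ 0 ∨ N ≤ 1' guard is a totality guard only: under Pre_ val ≥ 1 and N ≥ 2;
--  Python's loop does not terminate for N ≤ 1 either — those inputs are outside Pre_)
def encodeLoop (cs : List Char) (N : Int) (v : Int) (acc : List Char) : List Char :=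
  if h : v ≤ 0 ∨ N ≤ 1 then acc
  else encodeLoop cs N (PySem.Int.floordiv v N)
        (acc ++ [PySem.List.pyGetD cs (PySem.Int.mod v N) ' '])
  termination_by v.toNat
  decreasing_by
    rw [not_or] at h
    rw [PySem.Int.floordiv_eq_ediv_of_pos (by omega)]
    have h2 : v / N < v := by rw [Int.ediv_lt_iff_lt_mul (by omega)]; nlinarith [h.1, h.2]
    omega

def nextValue_alt (chars : String) (currentValue : String) : String :=
  let cs := chars.toList
  let cv := currentValue.toList
  let N : Int := (cs.length : Int)
  let char2id : PySem.Dict Char Int :=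
    (PySem.List.enumerate cs 0).foldl (fun d p => d.insert p.2 p.1) PySem.Dict.empty
  let val := cv.foldl (fun v c => v * N + char2id.getD c 0) 0
  let val := val + 1
  let digits := encodeLoop cs N val []
  let out := digits.reverse
  String.ofList (List.replicate (cv.length - out.length) (PySem.List.pyGetD cs 0 ' ') ++ out)

-- ===== PRECONDITION & SPEC =====
-- Pre_ excludes exactly the inputs on which A raises: alphabets of length < 2 (IndexError on
-- the carry digit chars[1], reached whenever N ≤ 1) and characters of currentValue missing
-- from chars (KeyError).
def Pre_nextValue (chars : String) (currentValue : String) : Prop :=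
  2 ≤ chars.toList.length ∧ currentValue.toList.all (fun c => chars.toList.contains c) = true
instance (chars : String) (currentValue : String) : Decidable (Pre_nextValue chars currentValue) := by
  unfold Pre_nextValue; infer_instance

def pvWitness_nextValue : String × String := ("ab", "babb")

def Spec_nextValue (chars : String) (currentValue : String) (out : String) : Prop := out = nextValue_alt chars currentValue
instance (chars : String) (currentValue : String) (out : String) : Decidable (Spec_nextValue chars currentValue out) := by unfold Spec_nextValue; infer_instance

-- ===== CLAIM (what is proved, stated in full; the proofs are below) =====
def Claim_equal_nextValue : Prop := ∀ (chars : String) (currentValue : String), Dom_nextValue chars currentValue → Pre_nextValue chars currentValue → Spec_nextValue chars currentValue (nextValue chars currentValue)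

-- ===== LEMMAS AND PROOFS =====

-- proof-side digit-level models (least-significant digit first), in ediv/emod arithmetic

/-- value of a least-significant-first digit list -/
def valLSF (N : Int) : List Int → Int
  | [] => 0
  | x :: t => x + N * valLSF N t

/-- the digit list A's carry loop emits (least significant first) -/
def carryD (N : Int) (pre : Int) : List Int → List Int
  | [] => []
  | x :: t => (x + pre) % N :: carryD N ((x + pre) / N) t

/-- A's final carry after the loop -/
def finPre (N : Int) (pre : Int) : List Int → Int
  | [] => pre
  | x :: t => finPre N ((x + pre) / N) t

/-- base-N digits of v, least significant first -/
def toLSF (N : Int) (v : Int) : List Int :=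
  if h : v ≤ 0 ∨ N ≤ 1 then []
  else v % N :: toLSF N (v / N)
  termination_by v.toNat
  decreasing_by
    rw [not_or] at h
    have h2 : v / N < v := by rw [Int.ediv_lt_iff_lt_mul (by omega)]; nlinarith [h.1, h.2]
    omega

theorem valLSF_nonneg (N : Int) (l : List Int) (hN : 0 ≤ N) (h : ∀ x ∈ l, 0 ≤ x) :
    0 ≤ valLSF N l := by
  induction l with
  | nil => simp [valLSF]
  | cons x t ih =>
    have := h x (by simp)
    have ht := ih (fun x hx => h x (by simp [hx]))
    have : 0 ≤ N * valLSF N t := mul_nonneg hN ht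
    simp only [valLSF]; omega

theorem valLSF_append (N : Int) (l : List Int) (x : Int) :
    valLSF N (l ++ [x]) = valLSF N l + x * N ^ l.length := by
  induction l with
  | nil => simp [valLSF]
  | cons y t ih => simp [valLSF, ih, pow_succ]; ring

theorem foldl_horner (N : Int) (l : List Int) (v : Int) :
    l.foldl (fun v x => v * N + x) v = valLSF N l.reverse + v * N ^ l.length := by
  induction l generalizing v with
  | nil => simp [valLSF]
  | cons x t ih =>
    simp only [List.foldl_cons, List.reverse_cons, ih, valLSF_append, List.length_reverse,
      List.length_cons, pow_succ]
    ring

theorem carryD_zero (N : Int) (l : List Int) (h : ∀ x ∈ l, 0 ≤ x ∧ x < N) :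
    carryD N 0 l = l ∧ finPre N 0 l = 0 := by
  induction l with
  | nil => simp [carryD, finPre]
  | cons x t ih =>
    have hx := h x (by simp)
    have hmod : x % N = x := Int.emod_eq_of_lt hx.1 hx.2
    have hdiv : x / N = 0 := Int.ediv_eq_zero_of_lt hx.1 hx.2
    have ht := ih (fun y hy => h y (by simp [hy]))
    simp [carryD, finPre, hmod, hdiv, ht.1, ht.2]

theorem toLSF_pos (N v : Int) (hN : 2 ≤ N) (hv : 0 < v) :
    toLSF N v = v % N :: toLSF N (v / N) := by
  rw [toLSF, dif_neg (by omega : ¬ (v ≤ 0 ∨ N ≤ 1))]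

theorem toLSF_zero (N : Int) : toLSF N 0 = [] := by
  rw [toLSF]; simp

/-- padding a digit list back: a bounded digit list is its value's digits plus trailing zeros -/
theorem stripPad (N : Int) (hN : 2 ≤ N) (t : List Int) (h : ∀ x ∈ t, 0 ≤ x ∧ x < N) :
    t = toLSF N (valLSF N t) ++ List.replicate (t.length - (toLSF N (valLSF N t)).length) 0 := by
  induction t with
  | nil => simp [valLSF, toLSF_zero]
  | cons x t ih =>
    have hx := h x (by simp)
    have ht : ∀ y ∈ t, 0 ≤ y ∧ y < N := fun y hy => h y (by simp [hy])
    have hw : 0 ≤ valLSF N t := valLSF_nonneg N t (by omega) (fun y hy => (ht y hy).1)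
    have hih := ih ht
    by_cases hv : valLSF N (x :: t) = 0
    · -- all digits zero
      have hx0 : x = 0 ∧ valLSF N t = 0 := by
        simp only [valLSF] at hv
        have : 0 ≤ N * valLSF N t := mul_nonneg (by omega) hw
        have hxz : x = 0 := by omega
        have : N * valLSF N t = 0 := by omega
        rcases mul_eq_zero.mp this with h | h
        · omega
        · exact ⟨hxz, h⟩
      rw [hv, toLSF_zero]
      rw [hx0.2, toLSF_zero] at hih
      simp only [List.nil_append, List.length_nil, Nat.sub_zero] at hih ⊢
      rw [hx0.1, List.length_cons, List.replicate_succ]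
      exact congrArg _ hih
    · -- positive value
      have hvpos : 0 < valLSF N (x :: t) := by
        have : 0 ≤ N * valLSF N t := mul_nonneg (by omega) hw
        simp only [valLSF] at hv ⊢; omega
      rw [toLSF_pos N _ hN hvpos]
      have hmod : valLSF N (x :: t) % N = x := by
        simp only [valLSF, mul_comm N (valLSF N t)]
        rw [Int.add_mul_emod_self_right]
        exact Int.emod_eq_of_lt hx.1 hx.2
      have hdiv : valLSF N (x :: t) / N = valLSF N t := by
        simp only [valLSF, mul_comm N (valLSF N t)]
        rw [Int.add_mul_ediv_right _ _ (by omega : N ≠ 0)]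
        rw [Int.ediv_eq_zero_of_lt hx.1 hx.2]; ring
      rw [hmod, hdiv, List.length_cons, List.cons_append]
      refine congrArg (x :: ·) ?_
      simpa [Nat.succ_sub_succ] using hih

/-- main digit-level lemma: A's carry output with its final carry digit equals
    B's re-encoding of value+1 padded with trailing zeros -/
theorem carry_eq_encode (N : Int) (hN : 2 ≤ N) (ds : List Int)
    (h : ∀ x ∈ ds, 0 ≤ x ∧ x < N) :
    carryD N 1 ds ++ (if finPre N 1 ds ≠ 0 then [finPre N 1 ds] else [])
      = toLSF N (valLSF N ds + 1)
        ++ List.replicate (ds.length - (toLSF N (valLSF N ds + 1)).length) 0 := by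
  induction ds with
  | nil =>
    have h1 : (1 : Int) % N = 1 := Int.emod_eq_of_lt (by omega) (by omega)
    have h2 : (1 : Int) / N = 0 := Int.ediv_eq_zero_of_lt (by omega) (by omega)
    simp [carryD, finPre, valLSF, toLSF_pos N 1 hN (by omega), h1, h2, toLSF_zero]
  | cons x t ih =>
    have hx := h x (by simp)
    have ht : ∀ y ∈ t, 0 ≤ y ∧ y < N := fun y hy => h y (by simp [hy])
    have hw : 0 ≤ valLSF N t := valLSF_nonneg N t (by omega) (fun y hy => (ht y hy).1)
    have hvpos : 0 < valLSF N (x :: t) + 1 := by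
      have : 0 ≤ N * valLSF N t := mul_nonneg (by omega) hw
      simp only [valLSF]; omega
    have hval : valLSF N (x :: t) + 1 = (x + 1) + valLSF N t * N := by
      simp only [valLSF]; ring
    by_cases hc : x + 1 < N
    · -- no carry out of this digit
      have hmod1 : (x + 1) % N = x + 1 := Int.emod_eq_of_lt (by omega) hc
      have hdiv1 : (x + 1) / N = 0 := Int.ediv_eq_zero_of_lt (by omega) hc
      have hzt := carryD_zero N t ht
      have hmod : (valLSF N (x :: t) + 1) % N = x + 1 := by
        rw [hval, Int.add_mul_emod_self_right, hmod1]
      have hdiv : (valLSF N (x :: t) + 1) / N = valLSF N t := by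
        rw [hval, Int.add_mul_ediv_right _ _ (by omega : N ≠ 0), hdiv1, zero_add]
      rw [toLSF_pos N _ hN hvpos, hmod, hdiv]
      simp only [carryD, finPre, hmod1, hdiv1, hzt.1, hzt.2, List.length_cons,
        Nat.succ_sub_succ]
      rw [if_neg (by simp), List.append_nil, List.cons_append]
      exact congrArg (fun l => (x+1) :: l) (stripPad N hN t ht)
    · -- digit overflows: x + 1 = N
      have hxe : x + 1 = N := by omega
      have hval2 : valLSF N (x :: t) + 1 = 0 + (1 + valLSF N t) * N := by
        simp only [valLSF]; linear_combination hxe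
      have hmod : (valLSF N (x :: t) + 1) % N = 0 := by
        rw [hval2, Int.add_mul_emod_self_right, Int.zero_emod]
      have hdiv : (valLSF N (x :: t) + 1) / N = 1 + valLSF N t := by
        rw [hval2, Int.add_mul_ediv_right _ _ (by omega : N ≠ 0)]
        simp
      have hmod1 : (x + 1) % N = 0 := by rw [hxe, Int.emod_self]
      have hdiv1 : (x + 1) / N = 1 := by rw [hxe]; exact Int.ediv_self (by omega)
      rw [toLSF_pos N _ hN hvpos, hmod, hdiv]
      simp only [carryD, finPre, hmod1, hdiv1, List.cons_append, List.length_cons]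
      rw [add_comm 1 (valLSF N t), ih ht]
      simp [Nat.succ_sub_succ]

-- chr: how both ports turn a digit index into a character
theorem foldA (cs : List Char) (N : Int) (hN : 0 < N) (d : Char → Int)
    (l : List Char) (pre : Int) (res : List Char) :
    l.foldl (fun (st : Int × List Char) c =>
        (PySem.Int.floordiv (d c + st.1) N,
         st.2 ++ [PySem.List.pyGetD cs (PySem.Int.mod (d c + st.1) N) ' '])) (pre, res)
      = (finPre N pre (l.map d),
         res ++ (carryD N pre (l.map d)).map (fun k => PySem.List.pyGetD cs k ' ')) := by
  induction l generalizing pre res with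
  | nil => simp [finPre, carryD]
  | cons c t ih =>
    simp only [List.foldl_cons]
    rw [ih]
    simp only [List.map_cons, carryD, finPre, PySem.Int.floordiv_eq_ediv_of_pos hN,
      PySem.Int.mod_eq_emod_of_pos hN, List.append_assoc, List.cons_append, List.nil_append,
      List.map_cons]

theorem encodeLoop_eq (cs : List Char) (N : Int) (v : Int) (acc : List Char) :
    encodeLoop cs N v acc = acc ++ (toLSF N v).map (fun k => PySem.List.pyGetD cs k ' ') := by
  fun_induction encodeLoop cs N v acc with
  | case1 v acc h => rw [toLSF]; simp [h]
  | case2 v acc h ih =>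
    rw [not_or] at h
    rw [toLSF, dif_neg (by omega : ¬ (v ≤ 0 ∨ N ≤ 1))]
    rw [PySem.Int.floordiv_eq_ediv_of_pos (by omega), PySem.Int.mod_eq_emod_of_pos (by omega)] at ih ⊢
    simp [ih]

theorem dict_getD_bounds (B : Int) (l : List (Int × Char))
    (hl : ∀ p ∈ l, 0 ≤ p.1 ∧ p.1 < B) (d0 : PySem.Dict Char Int)
    (h0 : ∀ c, 0 ≤ d0.getD c 0 ∧ d0.getD c 0 < B) (c : Char) :
    0 ≤ (l.foldl (fun d p => d.insert p.2 p.1) d0).getD c 0 ∧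
      (l.foldl (fun d p => d.insert p.2 p.1) d0).getD c 0 < B := by
  induction l generalizing d0 with
  | nil => exact h0 c
  | cons p t ih =>
    refine ih (fun q hq => hl q (by simp [hq])) _ (fun c' => ?_)
    rw [PySem.Dict.getD_insert]
    split
    · exact hl p (by simp)
    · exact h0 c'

-- ===== VERDICT (by name: the statement is the Claim_ definition above) =====
theorem chr_if (cs : List Char) (p : Prop) [Decidable p] (l : List Int) (v : Int) :
    (if p then l.map (fun k => PySem.List.pyGetD cs k ' ') ++ [PySem.List.pyGetD cs v ' ']
     else l.map (fun k => PySem.List.pyGetD cs k ' '))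
      = (l ++ if p then [v] else []).map (fun k => PySem.List.pyGetD cs k ' ') := by
  split <;> simp

theorem nextValue_spec : Claim_equal_nextValue := by
  intro chars currentValue _ hpre
  obtain ⟨hlen, -⟩ := hpre
  show nextValue chars currentValue = nextValue_alt chars currentValue
  simp only [nextValue, nextValue_alt]
  set cs := chars.toList with hcs
  set cv := currentValue.toList with hcv
  set N : Int := (cs.length : Int) with hN
  have hN2 : 2 ≤ N := by simp [hN]; omega
  set char2id : PySem.Dict Char Int :=
    (PySem.List.enumerate cs 0).foldl (fun d p => d.insert p.2 p.1) PySem.Dict.empty with hdict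
  have hd : ∀ c : Char, 0 ≤ char2id.getD c 0 ∧ char2id.getD c 0 < N := by
    intro c
    refine dict_getD_bounds N _ ?_ _ ?_ c
    · intro p hp
      rw [PySem.List.mem_enumerate_iff] at hp
      obtain ⟨k, hk, rfl⟩ := hp
      constructor
      · positivity
      · simp only [hN]; omega
    · intro c'
      rw [PySem.Dict.getD_empty]
      omega
  rw [foldA cs N (by omega) (fun c => char2id.getD c 0) cv.reverse 1 []]
  set rds := cv.reverse.map (fun c => char2id.getD c 0) with hrds
  have hbnd : ∀ x ∈ rds, 0 ≤ x ∧ x < N := by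
    intro x hx
    rw [hrds, List.mem_map] at hx
    obtain ⟨c, _, rfl⟩ := hx
    exact hd c
  -- B's Horner value is the value of rds
  have hval : cv.foldl (fun v c => v * N + char2id.getD c 0) 0 = valLSF N rds := by
    have : cv.foldl (fun v c => v * N + char2id.getD c 0) 0
        = (cv.map (fun c => char2id.getD c 0)).foldl (fun v x => v * N + x) 0 := by
      rw [List.foldl_map]
    rw [this, foldl_horner, hrds, List.map_reverse]
    simp
  rw [hval, encodeLoop_eq]
  -- reduce A's side to digit lists
  simp only [List.nil_append]
  rw [chr_if cs _ (carryD N 1 rds) (finPre N 1 rds)]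
  rw [carry_eq_encode N hN2 rds hbnd]
  -- now pure list algebra
  rw [List.map_append, List.reverse_append, List.map_replicate, List.reverse_replicate]
  have hlen1 : rds.length = cv.length := by rw [hrds]; simp
  have hlen2 : ((toLSF N (valLSF N rds + 1)).map
      (fun k => PySem.List.pyGetD cs k ' ')).reverse.length
      = (toLSF N (valLSF N rds + 1)).length := by simp
  rw [hlen2, hlen1]
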